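-- pv_equiv track=rewrite | github.com/ntr17/strenght-coach-agent | src/prompt.py | _format_coach_focus
-- ===== SOURCE A (Python) =====
-- def _format_coach_focus(coach_focus: list[dict]) -> str:
--     """
--     Format the coach's active watch list for inclusion in the prompt.
--     Only shows OPEN items. PINNED items always shown first; HIGH/NORMAL items follow.
--     """
--     open_items = [f for f in coach_focus if f.get("Status", "OPEN") == "OPEN"
--                   and not f.get("Item", "").startswith("#")]
--     if not open_items:
--         return ""
--
--     # Sort: PINNED first, HIGH second, NORMAL last (within each group: oldest first)
--     priority_rank = {"PINNED": 0, "HIGH": 1, "NORMAL": 2, "": 2}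
--     open_items = sorted(open_items, key=lambda f: priority_rank.get(
--         f.get("Priority", "NORMAL").upper(), 2))
--
--     lines = []
--     for item in open_items[-20:]:  # show up to 20 (PINNEDs always visible)
--         cat = item.get("Category", "").upper()
--         text = item.get("Item", "").strip()
--         last = item.get("Last Mentioned", "")
--         added = item.get("Date Added", "")
--         priority = item.get("Priority", "NORMAL").upper()
--         timestamp = last or added
--         badge = " [PINNED]" if priority == "PINNED" else (" [HIGH]" if priority == "HIGH" else "")
--         lines.append(f"  [{cat}]{badge} {text}" + (f" [since {timestamp}]" if timestamp else ""))
--     return "\n".join(lines)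
-- ===== SOURCE B (Python) =====
-- def _format_coach_focus(coach_focus: list[dict]) -> str:
--     """
--     Format the coach's active watch list for inclusion in the prompt.
--     Three staged comprehensions (PINNED / HIGH / other shown items) instead of
--     filter-then-stable-sort; their concatenation is the stable sorted order.
--     """
--     def shown(f):
--         return (f.get("Status", "OPEN") == "OPEN"
--                 and not f.get("Item", "").startswith("#"))
--
--     def prio(f):
--         return f.get("Priority", "NORMAL").upper()
--
--     pinned = [f for f in coach_focus if shown(f) and prio(f) == "PINNED"]
--     high = [f for f in coach_focus if shown(f) and prio(f) == "HIGH"]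
--     rest = [f for f in coach_focus
--             if shown(f) and prio(f) != "PINNED" and prio(f) != "HIGH"]
--     ordered = pinned + high + rest
--     if not ordered:
--         return ""
--
--     def render(item):
--         p = prio(item)
--         badge = {"PINNED": " [PINNED]", "HIGH": " [HIGH]"}.get(p, "")
--         ts = item.get("Last Mentioned", "") or item.get("Date Added", "")
--         tail = f" [since {ts}]" if ts else ""
--         cat = item.get("Category", "").upper()
--         return f"  [{cat}]{badge} {item.get('Item', '').strip()}{tail}"
--
--     return "\n".join(render(it) for it in ordered[-20:])
-- ===== Notes on version B (the rewrite author's own statement) =====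
-- stated objective: alternative
-- what changed: Replaces filter-then-stable-sort-by-rank with three staged comprehensions over the raw list (pinned, high, rest, each keeping input order) whose concatenation is the stable sorted order, and builds lines by mapping a render function instead of an accumulator loop.
import Mathlib
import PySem

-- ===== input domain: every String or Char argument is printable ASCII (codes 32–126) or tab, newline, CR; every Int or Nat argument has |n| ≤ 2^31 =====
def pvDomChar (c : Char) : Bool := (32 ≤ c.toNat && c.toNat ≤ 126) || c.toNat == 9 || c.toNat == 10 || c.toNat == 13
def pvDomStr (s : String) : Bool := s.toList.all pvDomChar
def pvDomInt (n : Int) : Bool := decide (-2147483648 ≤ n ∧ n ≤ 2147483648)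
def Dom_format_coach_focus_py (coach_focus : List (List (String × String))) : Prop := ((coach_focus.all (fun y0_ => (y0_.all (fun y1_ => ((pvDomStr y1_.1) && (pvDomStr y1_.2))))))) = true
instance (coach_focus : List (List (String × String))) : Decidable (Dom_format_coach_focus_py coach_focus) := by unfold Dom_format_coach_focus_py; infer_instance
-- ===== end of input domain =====

-- B replaces A's filter + stable sort by priority rank with three staged comprehensions
-- (pinned / high / rest, each in input order) and a map instead of an accumulator loop.

-- ===== PORT A =====

-- item.get(k, dflt) on a dict passed in as an association list (first match wins)
def pvItemGet (f : List (String × String)) (k dflt : String) : String :=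
  PySem.Dict.getD (PySem.Dict.mk f) k dflt

-- the filter of the list comprehension building open_items
def pvOpen (f : List (String × String)) : Bool :=
  (pvItemGet f "Status" "OPEN" == "OPEN") && !(PySem.Str.startswith (pvItemGet f "Item" "") "#")

-- priority_rank = {"PINNED": 0, "HIGH": 1, "NORMAL": 2, "": 2}
def pvPriorityRank : PySem.Dict String Int :=
  PySem.Dict.ofList [("PINNED", 0), ("HIGH", 1), ("NORMAL", 2), ("", 2)]

-- the sort key: priority_rank.get(f.get("Priority", "NORMAL").upper(), 2)
def pvRank (f : List (String × String)) : Int :=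
  PySem.Dict.getD pvPriorityRank (PySem.Str.upper (pvItemGet f "Priority" "NORMAL")) 2

-- the body of the line-building loop
def pvLine (item : List (String × String)) : String :=
  let cat := PySem.Str.upper (pvItemGet item "Category" "")
  let text := PySem.Str.strip (pvItemGet item "Item" "")
  let last := pvItemGet item "Last Mentioned" ""
  let added := pvItemGet item "Date Added" ""
  let priority := PySem.Str.upper (pvItemGet item "Priority" "NORMAL")
  let timestamp := if last == "" then added else last   -- last or added
  let badge := if priority == "PINNED" then " [PINNED]" else (if priority == "HIGH" then " [HIGH]" else "")
  "  [" ++ cat ++ "]" ++ badge ++ " " ++ text ++ (if timestamp == "" then "" else " [since " ++ timestamp ++ "]")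

def format_coach_focus_py (coach_focus : List (List (String × String))) : String :=
  let open_items := coach_focus.filter pvOpen
  if open_items = [] then ""
  else
    let open_items := PySem.List.sorted open_items pvRank
    let lines := (PySem.List.slice open_items (some (-20)) none).foldl
      (fun acc item => acc ++ [pvLine item]) []
    PySem.Str.join "\n" lines

-- ===== PORT B =====

-- B's own first-match association-list lookup (= dict .get with a default)
def pvLookup (k : String) : List (String × String) → String → String
  | [], d => d
  | (a, v) :: t, d => if a == k then v else pvLookup k t d

-- shown(f): open and not a '#' comment
def pvShown (f : List (String × String)) : Bool :=
  (pvLookup "Status" f "OPEN" == "OPEN") && !(PySem.Str.startswith (pvLookup "Item" f "") "#")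

-- prio(f)
def pvPrio (f : List (String × String)) : String :=
  PySem.Str.upper (pvLookup "Priority" f "NORMAL")

-- {"PINNED": " [PINNED]", "HIGH": " [HIGH]"}
def pvBadgeTbl : PySem.Dict String String :=
  PySem.Dict.ofList [("PINNED", " [PINNED]"), ("HIGH", " [HIGH]")]

-- render(item)
def pvRender (item : List (String × String)) : String :=
  let p := pvPrio item
  let badge := PySem.Dict.getD pvBadgeTbl p ""
  let ts := let l := pvLookup "Last Mentioned" item ""
            if l == "" then pvLookup "Date Added" item "" else l
  let tail := if ts == "" then "" else " [since " ++ ts ++ "]"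
  let cat := PySem.Str.upper (pvLookup "Category" item "")
  "  [" ++ cat ++ "]" ++ badge ++ " " ++ PySem.Str.strip (pvLookup "Item" item "") ++ tail

def format_coach_focus_py_alt (coach_focus : List (List (String × String))) : String :=
  let pinned := coach_focus.filter (fun f => pvShown f && pvPrio f == "PINNED")
  let high := coach_focus.filter (fun f => pvShown f && pvPrio f == "HIGH")
  let rest := coach_focus.filter
    (fun f => pvShown f && !(pvPrio f == "PINNED") && !(pvPrio f == "HIGH"))
  let ordered := pinned ++ high ++ rest
  if ordered = [] then ""
  else PySem.Str.join "\n" ((PySem.List.slice ordered (some (-20)) none).map pvRender)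

-- ===== PRECONDITION & SPEC =====
def Spec_format_coach_focus_py (coach_focus : List (List (String × String))) (out : String) : Prop := out = format_coach_focus_py_alt coach_focus
instance (coach_focus : List (List (String × String))) (out : String) : Decidable (Spec_format_coach_focus_py coach_focus out) := by unfold Spec_format_coach_focus_py; infer_instance

-- ===== CLAIM (what is proved, stated in full; the proofs are below) =====
def Claim_equal_format_coach_focus_py : Prop := ∀ (coach_focus : List (List (String × String))), Dom_format_coach_focus_py coach_focus → Spec_format_coach_focus_py coach_focus (format_coach_focus_py coach_focus)

-- ===== LEMMAS AND PROOFS =====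

-- B's recursive lookup agrees with A's dict lookup
theorem pvLookup_eq (k : String) (f : List (String × String)) (d : String) :
    pvLookup k f d = pvItemGet f k d := by
  induction f with
  | nil => simp [pvLookup, pvItemGet, PySem.Dict.getD_eq_get?_getD]; rfl
  | cons p t ih =>
    obtain ⟨a, v⟩ := p
    simp only [pvLookup, pvItemGet, PySem.Dict.getD_eq_get?_getD, PySem.Dict.get?_mk_cons] at *
    by_cases h : (a == k) = true <;> simp [h, ih]

theorem pvShown_eq (f : List (String × String)) : pvShown f = pvOpen f := by
  simp [pvShown, pvOpen, pvLookup_eq]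

-- the rank as an if-chain on the uppercased priority string
theorem pvRank_eq (f : List (String × String)) :
    pvRank f = (if pvPrio f == "PINNED" then 0 else if pvPrio f == "HIGH" then 1 else 2) := by
  unfold pvRank pvPriorityRank
  have hp : PySem.Str.upper (pvItemGet f "Priority" "NORMAL") = pvPrio f := by
    simp [pvPrio, pvLookup_eq]
  rw [hp, PySem.Dict.getD_eq_get?_getD]
  generalize pvPrio f = s
  by_cases h0 : ("PINNED" : String) = s
  · subst h0; decide
  by_cases h1 : ("HIGH" : String) = s
  · subst h1; decide
  by_cases h2 : ("NORMAL" : String) = s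
  · subst h2; decide
  by_cases h3 : ("" : String) = s
  · subst h3; decide
  · have : (PySem.Dict.ofList [("PINNED", (0:Int)), ("HIGH", 1), ("NORMAL", 2), ("", 2)]).get? s = none := by
      have e : PySem.Dict.ofList [("PINNED", (0:Int)), ("HIGH", 1), ("NORMAL", 2), ("", 2)]
          = PySem.Dict.mk [("PINNED", (0:Int)), ("HIGH", 1), ("NORMAL", 2), ("", 2)] := by decide
      rw [e]
      simp [PySem.Dict.get?_mk_cons, beq_iff_eq, h0, h1, h2, h3]
      rfl
    rw [this]
    have e0 : (s == "PINNED") = false := by simp; exact fun h => h0 h.symm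
    have e1 : (s == "HIGH") = false := by simp; exact fun h => h1 h.symm
    simp [e0, e1, Option.getD]

-- the rank only takes the values 0, 1, 2
theorem pvRank_cases (f : List (String × String)) : pvRank f = 0 ∨ pvRank f = 1 ∨ pvRank f = 2 := by
  rw [pvRank_eq]; split_ifs <;> simp

-- insertBy skips a prefix it never inserts before
theorem pvInsertBy_append {α : Type} (before : α → α → Bool) (x : α) (l r : List α)
    (h : ∀ y ∈ l, before x y = false) :
    PySem.List.insertBy before x (l ++ r) = l ++ PySem.List.insertBy before x r := by
  induction l with
  | nil => simp
  | cons a t ih =>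
    have ha : before x a = false := h a (by simp)
    simp only [List.cons_append, PySem.List.insertBy, ha]
    simp [ih (fun y hy => h y (by simp [hy]))]

-- insertBy puts x in front of a list it inserts before the head of (or of [])
theorem pvInsertBy_front {α : Type} (before : α → α → Bool) (x : α) (r : List α)
    (h : ∀ hne : r ≠ [], before x (r.head hne) = true) :
    PySem.List.insertBy before x r = x :: r := by
  cases r with
  | nil => rfl
  | cons a t =>
    have := h (by simp)
    simp only [List.head_cons] at this
    simp [PySem.List.insertBy, this]

-- the insertion-sort fold lands each element at the end of its bucket
theorem pvFoldl_insertBy_buckets (xs : List (List (String × String)))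
    (A0 A1 A2 : List (List (String × String)))
    (h0 : ∀ y ∈ A0, pvRank y = 0) (h1 : ∀ y ∈ A1, pvRank y = 1) (h2 : ∀ y ∈ A2, pvRank y = 2) :
    xs.foldl (fun acc x => PySem.List.insertBy (fun a b => decide (pvRank a < pvRank b)) x acc)
      (A0 ++ A1 ++ A2)
    = (A0 ++ xs.filter (fun y => pvRank y = 0)) ++ (A1 ++ xs.filter (fun y => pvRank y = 1))
      ++ (A2 ++ xs.filter (fun y => pvRank y = 2)) := by
  induction xs generalizing A0 A1 A2 with
  | nil => simp
  | cons x t ih =>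
    simp only [List.foldl_cons, List.filter_cons]
    rcases pvRank_cases x with hx | hx | hx
    · have step : PySem.List.insertBy (fun a b => decide (pvRank a < pvRank b)) x (A0 ++ A1 ++ A2)
          = (A0 ++ [x]) ++ A1 ++ A2 := by
        rw [List.append_assoc, pvInsertBy_append _ _ A0 (A1 ++ A2)
          (fun y hy => by simp [hx, h0 y hy])]
        rw [pvInsertBy_front _ _ (A1 ++ A2) (fun hne => by
          have hm : (A1 ++ A2).head hne ∈ A1 ++ A2 := List.head_mem hne
          rcases List.mem_append.mp hm with hm | hm
          · simp [hx, h1 _ hm]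
          · simp [hx, h2 _ hm])]
        simp
      rw [step, ih (A0 ++ [x]) A1 A2
        (by intro y hy; rcases List.mem_append.mp hy with hy | hy
            · exact h0 y hy
            · simp at hy; subst hy; exact hx) h1 h2]
      simp [hx]
    · have step : PySem.List.insertBy (fun a b => decide (pvRank a < pvRank b)) x (A0 ++ A1 ++ A2)
          = A0 ++ (A1 ++ [x]) ++ A2 := by
        rw [pvInsertBy_append _ _ (A0 ++ A1) A2 (fun y hy => by
          rcases List.mem_append.mp hy with hy | hy
          · simp [hx, h0 y hy]
          · simp [hx, h1 y hy])]
        rw [pvInsertBy_front _ _ A2 (fun hne => by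
          have hm : A2.head hne ∈ A2 := List.head_mem hne
          simp [hx, h2 _ hm])]
        simp
      rw [step, ih A0 (A1 ++ [x]) A2 h0
        (by intro y hy; rcases List.mem_append.mp hy with hy | hy
            · exact h1 y hy
            · simp at hy; subst hy; exact hx) h2]
      simp [hx]
    · have step : PySem.List.insertBy (fun a b => decide (pvRank a < pvRank b)) x (A0 ++ A1 ++ A2)
          = A0 ++ A1 ++ (A2 ++ [x]) := by
        rw [PySem.List.insertBy_of_forall_not_before _ _ _ (fun y hy => by
          rcases List.mem_append.mp hy with hy | hy
          · rcases List.mem_append.mp hy with hy | hy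
            · simp [hx, h0 y hy]
            · simp [hx, h1 y hy]
          · simp [hx, h2 y hy])]
        simp
      rw [step, ih A0 A1 (A2 ++ [x]) h0 h1
        (by intro y hy; rcases List.mem_append.mp hy with hy | hy
            · exact h2 y hy
            · simp at hy; subst hy; exact hx)]
      simp [hx]

-- A's stable sort by rank is the concatenation of the three rank filters
theorem pvSorted_eq_filters (xs : List (List (String × String))) :
    PySem.List.sorted xs pvRank
      = xs.filter (fun y => pvRank y = 0) ++ xs.filter (fun y => pvRank y = 1)
        ++ xs.filter (fun y => pvRank y = 2) := by
  rw [PySem.List.sorted_eq_foldl_insertBy]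
  have := pvFoldl_insertBy_buckets xs [] [] [] (by simp) (by simp) (by simp)
  simpa using this

-- B's three staged filters in terms of A's open filter and rank
theorem pvOrdered_eq_sorted (cf : List (List (String × String))) :
    cf.filter (fun f => pvShown f && pvPrio f == "PINNED")
      ++ cf.filter (fun f => pvShown f && pvPrio f == "HIGH")
      ++ cf.filter (fun f => pvShown f && !(pvPrio f == "PINNED") && !(pvPrio f == "HIGH"))
    = PySem.List.sorted (cf.filter pvOpen) pvRank := by
  rw [pvSorted_eq_filters]
  simp only [List.filter_filter]
  have e0 : cf.filter (fun f => pvShown f && pvPrio f == "PINNED")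
      = cf.filter (fun a => decide (pvRank a = 0) && pvOpen a) := by
    apply List.filter_congr
    intro f _
    rw [pvRank_eq, pvShown_eq]
    by_cases hp : (pvPrio f == "PINNED") = true <;> by_cases hh : (pvPrio f == "HIGH") = true <;>
      simp [hp, hh, Bool.and_comm]
  have e1 : cf.filter (fun f => pvShown f && pvPrio f == "HIGH")
      = cf.filter (fun a => decide (pvRank a = 1) && pvOpen a) := by
    apply List.filter_congr
    intro f _
    rw [pvRank_eq, pvShown_eq]
    by_cases hp : (pvPrio f == "PINNED") = true
    · have hh : (pvPrio f == "HIGH") = false := by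
        simp only [beq_iff_eq] at hp ⊢
        rw [hp]; decide
      simp [hp, hh, Bool.and_comm]
    · by_cases hh : (pvPrio f == "HIGH") = true <;> simp [hp, hh, Bool.and_comm]
  have e2 : cf.filter (fun f => pvShown f && !(pvPrio f == "PINNED") && !(pvPrio f == "HIGH"))
      = cf.filter (fun a => decide (pvRank a = 2) && pvOpen a) := by
    apply List.filter_congr
    intro f _
    rw [pvRank_eq, pvShown_eq]
    by_cases hp : (pvPrio f == "PINNED") = true <;> by_cases hh : (pvPrio f == "HIGH") = true <;>
      simp [hp, hh, Bool.and_comm]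
  rw [e0, e1, e2]

-- B's badge table lookup as A's if-chain
theorem pvBadge_eq (p : String) :
    PySem.Dict.getD pvBadgeTbl p ""
      = (if p == "PINNED" then " [PINNED]" else if p == "HIGH" then " [HIGH]" else "") := by
  have e : pvBadgeTbl = PySem.Dict.mk [("PINNED", " [PINNED]"), ("HIGH", " [HIGH]")] := by decide
  rw [PySem.Dict.getD_eq_get?_getD, e]
  by_cases h0 : ("PINNED" : String) = p
  · subst h0; decide
  by_cases h1 : ("HIGH" : String) = p
  · subst h1; decide
  · have a0 : ("PINNED" == p) = false := by simp; exact h0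
    have a1 : ("HIGH" == p) = false := by simp; exact h1
    have b0 : (p == "PINNED") = false := by simp; exact fun h => h0 h.symm
    have b1 : (p == "HIGH") = false := by simp; exact fun h => h1 h.symm
    simp only [PySem.Dict.get?_mk_cons, a0, a1, b0, b1]
    rfl

-- B's render equals A's line body
theorem pvRender_eq (item : List (String × String)) : pvRender item = pvLine item := by
  unfold pvRender pvLine
  simp only [pvLookup_eq, pvPrio, pvBadge_eq]

-- the accumulator loop over the slice is a map
theorem pvFoldl_append_map {α β : Type} (f : α → β) (l : List α) (acc : List β) :
    l.foldl (fun acc item => acc ++ [f item]) acc = acc ++ l.map f := by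
  induction l generalizing acc with
  | nil => simp
  | cons x t ih => simp [ih]

-- ===== VERDICT (by name: the statement is the Claim_ definition above) =====
theorem format_coach_focus_py_spec : Claim_equal_format_coach_focus_py := by
  intro coach_focus _
  unfold Spec_format_coach_focus_py format_coach_focus_py format_coach_focus_py_alt
  simp only [pvOrdered_eq_sorted]
  have hlen : (PySem.List.sorted (coach_focus.filter pvOpen) pvRank) = [] ↔
      coach_focus.filter pvOpen = [] := by
    constructor <;> intro h
    · have := PySem.List.length_sorted (xs := coach_focus.filter pvOpen) (key := pvRank)
        (rev := false)
      rw [h] at this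
      exact List.length_eq_zero_iff.mp this.symm
    · rw [h]; rfl
  by_cases h : coach_focus.filter pvOpen = []
  · simp only [h]
    simp [PySem.List.sorted]
  · simp only [if_neg h, if_neg (fun hh => h (hlen.mp hh))]
    rw [pvFoldl_append_map]
    simp [List.map_congr_left (fun item _ => pvRender_eq item)]
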